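-- pv_equiv track=rewrite | github.com/davidrgntm/kkbot-v2 | kkbot-v2-main/handlers/reporting.py | _shift_month
-- ===== SOURCE A (Python) =====
-- def _shift_month(year: int, month: int, delta: int) -> tuple[int, int]:
--     month += delta
--     while month <= 0:
--         month += 12
--         year -= 1
--     while month > 12:
--         month -= 12
--         year += 1
--     return year, month
-- ===== SOURCE B (Python) =====
-- def _shift_month(year: int, month: int, delta: int) -> tuple[int, int]:
--     y, m = divmod(month + delta - 1, 12)
--     return year + y, m + 1
-- ===== Notes on version B (the rewrite author's own statement) =====
-- stated objective: faster
-- what changed: Replaced the two year-borrowing/carrying while-loops by one closed-form divmod on the zero-based month index.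
import Mathlib
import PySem

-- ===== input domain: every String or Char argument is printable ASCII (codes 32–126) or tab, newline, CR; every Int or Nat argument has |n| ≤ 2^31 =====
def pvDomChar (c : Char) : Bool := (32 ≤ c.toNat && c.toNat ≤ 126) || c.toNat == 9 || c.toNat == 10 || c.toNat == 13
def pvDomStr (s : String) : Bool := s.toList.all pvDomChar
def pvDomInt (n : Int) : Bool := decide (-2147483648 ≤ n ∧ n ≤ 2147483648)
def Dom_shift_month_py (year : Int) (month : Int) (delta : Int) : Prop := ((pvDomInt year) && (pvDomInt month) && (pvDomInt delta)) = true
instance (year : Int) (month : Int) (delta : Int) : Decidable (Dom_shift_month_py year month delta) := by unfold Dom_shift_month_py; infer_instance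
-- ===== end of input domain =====

-- B replaces A's two year-borrowing/carrying while-loops by one closed-form divmod (simpler).

-- ===== PORT A =====
-- `while month <= 0: month += 12; year -= 1`
def pvLoopUp (year : Int) (month : Int) : Int × Int :=
  if month ≤ 0 then pvLoopUp (year - 1) (month + 12) else (year, month)
  termination_by (1 - month).toNat
  decreasing_by omega

-- `while month > 12: month -= 12; year += 1`
def pvLoopDown (year : Int) (month : Int) : Int × Int :=
  if month > 12 then pvLoopDown (year + 1) (month - 12) else (year, month)
  termination_by (month - 12).toNat
  decreasing_by omega

def shift_month_py (year : Int) (month : Int) (delta : Int) : Int × Int :=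
  let month := month + delta
  let r1 := pvLoopUp year month
  pvLoopDown r1.1 r1.2

-- ===== PORT B =====
def shift_month_py_alt (year : Int) (month : Int) (delta : Int) : Int × Int :=
  let y := PySem.Int.floordiv (month + delta - 1) 12
  let m := PySem.Int.mod (month + delta - 1) 12
  (year + y, m + 1)

-- ===== PRECONDITION & SPEC =====
def Spec_shift_month_py (year : Int) (month : Int) (delta : Int) (out : Int × Int) : Prop := out = shift_month_py_alt year month delta
instance (year : Int) (month : Int) (delta : Int) (out : Int × Int) : Decidable (Spec_shift_month_py year month delta out) := by unfold Spec_shift_month_py; infer_instance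

-- ===== CLAIM (what is proved, stated in full; the proofs are below) =====
def Claim_equal_shift_month_py : Prop := ∀ (year : Int) (month : Int) (delta : Int), Dom_shift_month_py year month delta → Spec_shift_month_py year month delta (shift_month_py year month delta)

-- ===== LEMMAS AND PROOFS =====
theorem pvLoopUp_spec (year month : Int) (h : month ≤ 0) :
    pvLoopUp year month = (year + (month - 1) / 12, (month - 1) % 12 + 1) := by
  fun_induction pvLoopUp year month with
  | case1 y m hm ih =>
    by_cases h' : m + 12 ≤ 0
    · rw [ih h']; simp only [Prod.mk.injEq]; constructor <;> omega
    · rw [pvLoopUp]; simp only [if_neg h']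
      simp only [Prod.mk.injEq]; constructor <;> omega
  | case2 y m hm => omega

theorem pvLoopDown_spec (year month : Int) (h : 0 < month) :
    pvLoopDown year month = (year + (month - 1) / 12, (month - 1) % 12 + 1) := by
  fun_induction pvLoopDown year month with
  | case1 y m hm ih =>
    rw [ih (by omega)]; simp only [Prod.mk.injEq]; constructor <;> omega
  | case2 y m hm => simp only [Prod.mk.injEq]; constructor <;> omega

-- ===== VERDICT (by name: the statement is the Claim_ definition above) =====
theorem shift_month_py_spec : Claim_equal_shift_month_py := by
  intro year month delta _
  simp only [Spec_shift_month_py, shift_month_py, shift_month_py_alt]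
  rw [PySem.Int.floordiv_eq_ediv_of_pos (by norm_num), PySem.Int.mod_eq_emod_of_pos (by norm_num)]
  by_cases h : month + delta ≤ 0
  · rw [pvLoopUp_spec _ _ h]
    rw [pvLoopDown_spec _ _ (by omega)]
    simp only [Prod.mk.injEq]; constructor <;> omega
  · rw [pvLoopUp]; simp only [if_neg h]
    rw [pvLoopDown_spec _ _ (by omega)]
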